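-- pv_equiv track=rewrite | github.com/TimofeySugaipov/ArchivedPythonCodes | Algorithms and Programming Summative Report and Implementation/SumFree.py | isSumFree
-- ===== SOURCE A (Python) =====
-- def isSumFree(L):
--     for x in range(len(L)):
--         A = [n for n in L]
--         sums = []
--         A.pop(x)
--         for i in range(len(A)):
--             for value in A[i+1:]:
--                 S  = A[i]+value
--                 if S not in sums:
--                     sums.append(S)
--         if L[x] in sums:
--             return False
--     return True
-- ===== SOURCE B (Python) =====
-- def isSumFree(L):
--     for x in range(len(L)):
--         target = L[x]
--         rest = L[:x] + L[x+1:]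
--         seen = set()
--         for v in rest:
--             if target - v in seen:
--                 return False
--             seen.add(v)
--     return True
-- ===== Notes on version B (the rewrite author's own statement) =====
-- stated objective: faster
-- what changed: Replaced the per-element all-pairs sums list (built with a linear 'not in' dedup scan per pair) by a hash-set two-sum scan over the list without the current element.
import Mathlib
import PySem

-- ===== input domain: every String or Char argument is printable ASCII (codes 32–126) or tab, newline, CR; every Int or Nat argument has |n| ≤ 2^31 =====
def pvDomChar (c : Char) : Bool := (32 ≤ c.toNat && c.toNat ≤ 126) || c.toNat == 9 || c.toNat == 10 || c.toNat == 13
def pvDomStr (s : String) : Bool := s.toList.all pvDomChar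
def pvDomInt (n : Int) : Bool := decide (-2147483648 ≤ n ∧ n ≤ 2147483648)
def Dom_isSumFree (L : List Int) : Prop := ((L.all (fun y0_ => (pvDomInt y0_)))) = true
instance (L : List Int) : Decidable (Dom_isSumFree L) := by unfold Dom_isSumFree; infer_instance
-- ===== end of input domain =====

-- B replaces A's per-element all-pairs sums list (with a linear dedup scan per pair) by a set-based two-sum scan: faster.

-- ===== PORT A =====
-- inner two loops: for i in range(len A): for value in A[i+1:]: dedup-append A[i]+value,
-- transcribed as the structural recursion a :: rest ↦ fold over rest, then recurse on rest
def pySumsInner (a : Int) (sums : List Int) (rest : List Int) : List Int :=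
  rest.foldl (fun s v => if s.contains (a + v) then s else s ++ [a + v]) sums

def pySums : List Int → List Int → List Int
  | sums, [] => sums
  | sums, a :: rest => pySums (pySumsInner a sums rest) rest

def isSumFree (L : List Int) : Bool :=
  -- for x in range(len(L)): … return False / return True  =  !any; x < len L so pop?/pyGetD never fail
  !((List.range L.length).any (fun x =>
      let A := ((PySem.List.pop? L (x : Int)).getD (0, [])).2
      (pySums [] A).contains (PySem.List.pyGetD L (x : Int) 0)))

-- ===== PORT B =====
-- for v in rest: if target - v in seen: return False; seen.add(v)
def twoSumLoop (target : Int) (seen : PySem.Set Int) : List Int → Bool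
  | [] => false
  | v :: rest =>
      if PySem.Set.contains seen (target - v) then true
      else twoSumLoop target (PySem.Set.add seen v) rest

def isSumFree_alt (L : List Int) : Bool :=
  !((List.range L.length).any (fun x =>
      twoSumLoop (PySem.List.pyGetD L (x : Int) 0) PySem.Set.empty
        (PySem.List.slice L none (some (x : Int)) ++ PySem.List.slice L (some ((x : Int) + 1)) none)))

-- ===== PRECONDITION & SPEC =====
def Spec_isSumFree (L : List Int) (out : Bool) : Prop := out = isSumFree_alt L
instance (L : List Int) (out : Bool) : Decidable (Spec_isSumFree L out) := by unfold Spec_isSumFree; infer_instance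

-- ===== CLAIM (what is proved, stated in full; the proofs are below) =====
def Claim_equal_isSumFree : Prop := ∀ (L : List Int), Dom_isSumFree L → Spec_isSumFree L (isSumFree L)

-- ===== LEMMAS AND PROOFS =====

-- proof-side: the pairwise sums of a list, in A's traversal order
def pairSums : List Int → List Int
  | [] => []
  | a :: rest => rest.map (a + ·) ++ pairSums rest

theorem mem_dedupAppend (t S : Int) (sums : List Int) :
    t ∈ (if S ∈ sums then sums else sums ++ [S]) ↔ t ∈ sums ∨ t = S := by
  by_cases h : S ∈ sums
  · simp only [h, if_pos]
    constructor
    · exact Or.inl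
    · rintro (ht | rfl)
      · exact ht
      · exact h
  · simp [h]

theorem contains_dedupFold (t a : Int) (xs : List Int) : ∀ (sums : List Int),
    (xs.foldl (fun s v => if s.contains (a + v) then s else s ++ [a + v]) sums).contains t
      = (sums.contains t || (xs.map (a + ·)).contains t) := by
  induction xs with
  | nil => simp
  | cons v rest ih =>
    intro sums
    simp only [List.foldl_cons, ih]
    rw [Bool.eq_iff_iff]
    simp [mem_dedupAppend]
    tauto

theorem contains_pySums (t : Int) (A : List Int) : ∀ (sums : List Int),
    (pySums sums A).contains t = (sums.contains t || (pairSums A).contains t) := by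
  induction A with
  | nil => simp [pySums, pairSums]
  | cons a rest ih =>
    intro sums
    rw [pySums, ih, pySumsInner, contains_dedupFold]
    rw [Bool.eq_iff_iff]
    simp [pairSums]
    exact or_assoc

theorem twoSumLoop_eq (t : Int) (A : List Int) : ∀ (seen : PySem.Set Int),
    twoSumLoop t seen A
      = (A.any (fun v => PySem.Set.contains seen (t - v)) || (pairSums A).contains t) := by
  induction A with
  | nil => simp [twoSumLoop, pairSums]
  | cons v rest ih =>
    intro seen
    rw [twoSumLoop]
    by_cases h : t - v ∈ seen
    · simp [PySem.Set.contains, h]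
    · rw [if_neg (by simpa [PySem.Set.contains] using h), ih, Bool.eq_iff_iff]
      simp [pairSums, PySem.Set.contains, PySem.Set.mem_add, h]
      constructor
      · rintro (⟨w, hw, (hs | he)⟩ | hp)
        · exact Or.inl ⟨w, hw, hs⟩
        · exact Or.inr (Or.inl ⟨w, hw, by omega⟩)
        · exact Or.inr (Or.inr hp)
      · rintro (⟨w, hw, hs⟩ | ⟨w, hw, he⟩ | hp)
        · exact Or.inl ⟨w, hw, Or.inl hs⟩
        · exact Or.inl ⟨w, hw, Or.inr (by omega)⟩
        · exact Or.inr hp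

-- ===== VERDICT (by name: the statement is the Claim_ definition above) =====
theorem isSumFree_spec : Claim_equal_isSumFree := by
  intro L _
  unfold Spec_isSumFree isSumFree isSumFree_alt
  congr 1
  apply PySem.List.any_congr_mem
  intro x hx
  have hlt : x < L.length := List.mem_range.mp hx
  rw [PySem.List.pop?_natCast L x hlt]
  have hcast : ((x : Int) + 1) = (((x + 1 : Nat)) : Int) := by push_cast; ring
  rw [hcast, PySem.List.slice_to_natCast, PySem.List.slice_from_natCast,
      ← List.eraseIdx_eq_take_drop_succ]
  simp only [Option.getD_some]
  rw [contains_pySums, twoSumLoop_eq]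
  simp [PySem.Set.empty, PySem.Set.contains]
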